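-- pv_equiv track=rewrite | github.com/timoassmann9/aoc | 2025/day3/part2.py | get_max_joltage
-- ===== SOURCE A (Python) =====
-- def get_max_joltage(bank: str, digits):
--     result = ""
--     start = 0
--
--     for pos in range(digits):
--         remaining = digits - pos
--         end = len(bank) - remaining
--         best_char = max(bank[start:end+1])
--         best_index = bank.index(best_char, start, end+1)
--
--         result += best_char
--         start = best_index + 1
--
--     return result
-- ===== SOURCE B (Python) =====
-- def get_max_joltage(bank: str, digits):
--     # Single left-to-right pass with a monotonic stack: pop smaller digits while
--     # we can still afford to drop characters, instead of rescanning a window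
--     # with max()/index() for every output position.
--     if digits <= 0:
--         return ""
--     drops = len(bank) - digits
--     stack = []
--     for c in bank:
--         while drops > 0 and stack and stack[-1] < c:
--             stack.pop()
--             drops -= 1
--         stack.append(c)
--     return "".join(stack[:digits])
-- ===== Notes on version B (the rewrite author's own statement) =====
-- stated objective: faster
-- what changed: Replaced the per-output-position max()/index() window rescans with a single left-to-right monotonic-stack pass guarded by a remaining-drop budget.
import Mathlib
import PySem

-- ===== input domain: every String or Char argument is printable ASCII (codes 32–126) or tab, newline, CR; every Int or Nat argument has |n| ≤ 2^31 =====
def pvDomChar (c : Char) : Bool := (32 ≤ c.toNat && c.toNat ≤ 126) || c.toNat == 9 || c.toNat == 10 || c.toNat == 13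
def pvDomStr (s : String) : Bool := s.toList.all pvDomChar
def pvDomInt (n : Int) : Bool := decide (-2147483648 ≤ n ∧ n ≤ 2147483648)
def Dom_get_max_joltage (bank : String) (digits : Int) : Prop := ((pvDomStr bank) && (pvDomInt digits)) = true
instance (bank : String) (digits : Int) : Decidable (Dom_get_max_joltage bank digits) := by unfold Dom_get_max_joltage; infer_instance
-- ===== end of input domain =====

-- B replaces A's per-position max()/index() window rescans by one monotonic-stack pass
-- over the string with a remaining-drop budget; equal return values are proved for
-- every input on which A returns (digits ≤ len(bank)).

-- ===== PORT A =====
-- A's loop: for pos in range(digits), state (result, start).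
-- bank.index(best_char, start, end+1) is ported as start + (first index of best_char in
-- the slice bank[start:end+1]); exact here because best_char = max of that same slice.
def pvAStep (l : List Char) (digits : Int) (st : List Char × Int) (pos : Int) : List Char × Int :=
  let result := st.1
  let start := st.2
  let remaining := digits - pos
  let e := (l.length : Int) - remaining
  let w := PySem.List.slice l (some start) (some (e + 1))
  match PySem.List.max? w (fun c => c) with
  | none => (result, start)              -- Python raises ValueError here (empty window); outside Pre_
  | some c =>
    let best_index : Int := start + ((PySem.List.index? w c).getD 0 : Nat)
    (result ++ [c], best_index + 1)

def get_max_joltage (bank : String) (digits : Int) : String :=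
  let l := bank.toList
  let fin := (PySem.List.pyRange 0 digits 1).foldl (pvAStep l digits) ([], 0)
  String.ofList fin.1

-- ===== PORT B =====
-- the inner 'while drops > 0 and stack and stack[-1] < c' loop (stack stored top-first)
def pvPop (c : Char) : List Char → Int → List Char × Int
  | [], d => ([], d)
  | t :: r, d => if 0 < d ∧ t < c then pvPop c r (d - 1) else (t :: r, d)

-- the 'for c in bank' loop, state (stack, drops)
def pvRun : List Char → List Char → Int → List Char × Int
  | [], st, d => (st, d)
  | c :: rest, st, d =>
    let p := pvPop c st d
    pvRun rest (c :: p.1) p.2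

def get_max_joltage_alt (bank : String) (digits : Int) : String :=
  if digits ≤ 0 then "" else
    let l := bank.toList
    let fin := pvRun l [] ((l.length : Int) - digits)
    String.ofList (PySem.List.slice fin.1.reverse none (some digits))   -- stack[:digits]

-- ===== PRECONDITION & SPEC =====
-- Pre_ excludes exactly digits > len(bank), on which A always raises ValueError
-- (max() of an empty window); A returns normally on every other input.
def Pre_get_max_joltage (bank : String) (digits : Int) : Prop :=
  digits ≤ PySem.Str.len bank
instance (bank : String) (digits : Int) : Decidable (Pre_get_max_joltage bank digits) := by
  unfold Pre_get_max_joltage; infer_instance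

def pvWitness_get_max_joltage : String × Int := ("9218", 2)

def Spec_get_max_joltage (bank : String) (digits : Int) (out : String) : Prop := out = get_max_joltage_alt bank digits
instance (bank : String) (digits : Int) (out : String) : Decidable (Spec_get_max_joltage bank digits out) := by unfold Spec_get_max_joltage; infer_instance

-- ===== CLAIM (what is proved, stated in full; the proofs are below) =====
def Claim_equal_get_max_joltage : Prop := ∀ (bank : String) (digits : Int), Dom_get_max_joltage bank digits → Pre_get_max_joltage bank digits → Spec_get_max_joltage bank digits (get_max_joltage bank digits)

-- ===== LEMMAS AND PROOFS =====

-- the greedy choice both programs compute, in recursive form: with m output characters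
-- still to produce from suffix s, pick the first maximal char of s.take (s.length - (m-1))
def pvGreedy : Nat → List Char → List Char
  | 0, _ => []
  | m + 1, s =>
    let w := s.take (s.length - m)
    match PySem.List.max? w (fun c => c) with
    | none => []
    | some c =>
      let i := (PySem.List.index? w c).getD 0
      c :: pvGreedy m (s.drop (i + 1))

-- pvPop pops a whole stack of chars < c when the budget suffices
theorem pvPop_all_lt (c : Char) : ∀ (st : List Char) (d : Int),
    (∀ x ∈ st, x < c) → (st.length : Int) ≤ d → pvPop c st d = ([], d - st.length) := by
  intro st
  induction st with
  | nil => intro d _ _; simp [pvPop]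
  | cons a r ih =>
    intro d hlt hd
    simp only [List.length_cons] at hd
    push_cast at hd
    simp only [pvPop]
    rw [if_pos ⟨by omega, hlt a List.mem_cons_self⟩]
    rw [ih (d - 1) (fun x hx => hlt x (List.mem_cons_of_mem a hx)) (by omega)]
    simp only [List.length_cons, Prod.mk.injEq, true_and]
    push_cast
    ring

-- pvPop drops some prefix of the stack and decrements the budget accordingly
theorem pvPop_spec (c : Char) : ∀ (st : List Char) (d : Int),
    ∃ k : Nat, k ≤ st.length ∧ pvPop c st d = (st.drop k, d - (k : Int)) := by
  intro st
  induction st with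
  | nil => intro d; exact ⟨0, by simp, by simp [pvPop]⟩
  | cons a r ih =>
    intro d
    by_cases h : 0 < d ∧ a < c
    · obtain ⟨k, hk, he⟩ := ih (d - 1)
      refine ⟨k + 1, by simp; omega, ?_⟩
      simp only [pvPop, if_pos h, he, List.drop_succ_cons, Prod.mk.injEq, true_and]
      push_cast
      ring
    · exact ⟨0, by simp, by simp [pvPop, h]⟩

-- a bottom element the budget cannot reach is never popped
theorem pvPop_append (x c : Char) : ∀ (S : List Char) (d : Int),
    (c < x → d ≤ (S.length : Int)) →
    pvPop x (S ++ [c]) d = ((pvPop x S d).1 ++ [c], (pvPop x S d).2) := by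
  intro S
  induction S with
  | nil =>
    intro d h
    simp only [List.nil_append, pvPop]
    rw [if_neg (by rintro ⟨h1, h2⟩; have := h h2; simp only [List.length_nil, Int.natCast_zero] at this; omega)]
  | cons a S ih =>
    intro d h
    simp only [List.cons_append, pvPop]
    by_cases hc : 0 < d ∧ a < x
    · rw [if_pos hc, if_pos hc]
      exact ih (d - 1) (fun hcx => by have := h hcx; simp only [List.length_cons] at this ⊢; push_cast at this ⊢; omega)
    · rw [if_neg hc, if_neg hc]
      simp

-- phase 1: the first maximal char c clears everything before it off the stack
theorem pvRun_phase1 (c : Char) (t : List Char) : ∀ (p st : List Char) (d : Int),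
    (∀ x ∈ p, x < c) → (∀ x ∈ st, x < c) → (p.length : Int) + st.length ≤ d →
    pvRun (p ++ c :: t) st d = pvRun t [c] (d - p.length - st.length) := by
  intro p
  induction p with
  | nil =>
    intro st d _ hst hd
    simp only [List.length_nil, Int.natCast_zero, zero_add] at hd ⊢
    simp only [List.nil_append, pvRun]
    rw [pvPop_all_lt c st d hst hd]
    simp only [Int.sub_zero]
  | cons a p ih =>
    intro st d hp hst hd
    simp only [List.cons_append, pvRun]
    obtain ⟨k, hk, he⟩ := pvPop_spec a st d
    rw [he]
    have hlt : ∀ x ∈ a :: st.drop k, x < c := by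
      intro x hx
      rcases List.mem_cons.mp hx with rfl | hx'
      · exact hp x List.mem_cons_self
      · exact hst x (List.mem_of_mem_drop hx')
    have hlen : ((p.length : Int)) + ((a :: st.drop k).length : Int) ≤ d - k := by
      simp only [List.length_cons, List.length_drop] at *
      push_cast [Nat.sub_add_cancel] at *
      omega
    rw [ih (a :: st.drop k) (d - k) (fun x hx => hp x (List.mem_cons_of_mem a hx)) hlt hlen]
    congr 1
    simp only [List.length_cons, List.length_drop] at *
    push_cast at *
    omega

-- phase 2: a bottom element c that every later bigger char arrives too late to pop stays put
theorem pvRun_phase2 (c : Char) : ∀ (t S : List Char) (d : Int),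
    (∀ (j : Nat) (hj : j < t.length), c < t[j] → d ≤ (j : Int) + S.length) →
    pvRun t (S ++ [c]) d = ((pvRun t S d).1 ++ [c], (pvRun t S d).2) := by
  intro t
  induction t with
  | nil => intro S d _; simp [pvRun]
  | cons x t ih =>
    intro S d h
    have h0 : c < x → d ≤ (S.length : Int) := by
      intro hcx
      simpa using h 0 (by simp) (by simpa using hcx)
    simp only [pvRun, pvPop_append x c S d h0]
    obtain ⟨k, hk, he⟩ := pvPop_spec x S d
    rw [he]
    simp only [← List.cons_append]
    refine ih (x :: S.drop k) (d - k) ?_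
    intro j hj hcj
    have := h (j + 1) (by simpa using hj) (by simpa using hcj)
    simp only [List.length_cons, List.length_drop] at this ⊢
    push_cast at this ⊢
    omega

-- the monotonic-stack run computes the greedy choice
theorem pvStack_eq_greedy : ∀ (m : Nat) (s : List Char), m ≤ s.length →
    (pvRun s [] ((s.length : Int) - m)).1.reverse.take m = pvGreedy m s := by
  intro m
  induction m with
  | zero => intro s _; simp [pvGreedy]
  | succ m ih =>
    intro s hms
    have hwlen : (s.take (s.length - m)).length = s.length - m := by
      simp
    obtain ⟨c, hmax⟩ : ∃ c, PySem.List.max? (s.take (s.length - m)) (fun c => c) = some c := by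
      cases hc : PySem.List.max? (s.take (s.length - m)) (fun c => c) with
      | none =>
        have := (PySem.List.max?_eq_none_iff _ _).mp hc
        have : (s.take (s.length - m)).length = 0 := by rw [this]; rfl
        omega
      | some c => exact ⟨c, rfl⟩
    have hcw : c ∈ s.take (s.length - m) := PySem.List.max?_mem hmax
    have hmaxall : ∀ y ∈ s.take (s.length - m), y ≤ c := PySem.List.max?_isMax hmax
    obtain ⟨i, hidx⟩ : ∃ i, PySem.List.index? (s.take (s.length - m)) c = some i := by
      cases hI : PySem.List.index? (s.take (s.length - m)) c with
      | none => exact absurd ((PySem.List.index?_eq_none_iff _ _).mp hI) (by simpa using hcw)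
      | some i => exact ⟨i, rfl⟩
    obtain ⟨pre, suf, hwdec, hprelen, hcpre⟩ := (PySem.List.index?_eq_some_iff _ _ _).mp hidx
    have hs_decomp : s = pre ++ c :: (suf ++ s.drop (s.length - m)) := by
      conv_lhs => rw [← List.take_append_drop (s.length - m) s]
      rw [hwdec]
      simp
    have hrestlen : (s.drop (s.length - m)).length = m := by simp; omega
    have hsuflen : s.length - m = i + 1 + suf.length := by
      rw [← hwlen, hwdec]
      simp [hprelen]
      omega
    have hpre_lt : ∀ x ∈ pre, x < c := by
      intro x hx
      refine lt_of_le_of_ne (hmaxall x (by rw [hwdec]; exact List.mem_append_left _ hx)) ?_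
      rintro rfl
      exact hcpre hx
    have hilen : i < s.length - m := by omega
    have h1 : pvRun s [] ((s.length : Int) - (m + 1)) =
        pvRun (suf ++ s.drop (s.length - m)) [c] ((s.length : Int) - (m + 1) - i) := by
      have := pvRun_phase1 c (suf ++ s.drop (s.length - m)) pre [] ((s.length : Int) - (m + 1))
        hpre_lt (by simp) (by simp [hprelen]; omega)
      rw [← hs_decomp] at this
      rw [this, hprelen]
      simp only [List.length_nil, Int.natCast_zero, Int.sub_zero]
    have h2 : pvRun (suf ++ s.drop (s.length - m)) [c] ((s.length : Int) - (m + 1) - i) =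
        ((pvRun (suf ++ s.drop (s.length - m)) [] ((s.length : Int) - (m + 1) - i)).1 ++ [c],
         (pvRun (suf ++ s.drop (s.length - m)) [] ((s.length : Int) - (m + 1) - i)).2) := by
      have := pvRun_phase2 c (suf ++ s.drop (s.length - m)) [] ((s.length : Int) - (m + 1) - i) ?_
      · simpa using this
      · intro j hj hcj
        by_cases hjs : j < suf.length
        · exfalso
          have hj' : (suf ++ s.drop (s.length - m))[j] = suf[j] := List.getElem_append_left hjs
          have hmem : suf[j] ∈ s.take (s.length - m) := by
            rw [hwdec]
            exact List.mem_append_right _ (List.mem_cons_of_mem c (List.getElem_mem hjs))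
          have := hmaxall _ hmem
          rw [hj'] at hcj
          exact absurd hcj (not_lt.mpr this)
        · simp only [List.length_nil]
          push_cast
          omega
    have htlen : (suf ++ s.drop (s.length - m)).length = suf.length + m := by
      simp [hrestlen]
    have hIH := ih (suf ++ s.drop (s.length - m)) (by omega)
    have hd' : (s.length : Int) - (m + 1) - i = ((suf ++ s.drop (s.length - m)).length : Int) - m := by
      rw [htlen]
      push_cast
      omega
    have hdrop : s.drop (i + 1) = suf ++ s.drop (s.length - m) := by
      conv_lhs => rw [hs_decomp]
      rw [show pre ++ c :: (suf ++ s.drop (s.length - m)) = (pre ++ [c]) ++ (suf ++ s.drop (s.length - m)) by simp]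
      rw [show i + 1 = (pre ++ [c]).length by simp [hprelen]]
      exact List.drop_left
    push_cast
    rw [h1, h2]
    simp only [List.reverse_append, List.reverse_cons, List.reverse_nil, List.nil_append,
      List.singleton_append, List.take_succ_cons]
    rw [hd', hIH]
    simp only [pvGreedy, hmax, hidx, Option.getD_some, hdrop]

-- A's indexed window loop computes the greedy choice on the remaining suffix
theorem pvA_loop_eq (l : List Char) (digits : Int) : ∀ (m : Nat) (start : Int) (res : List Char),
    0 ≤ start → start.toNat + m ≤ l.length →
    ((PySem.List.pyRange (digits - m) digits 1).foldl (pvAStep l digits) (res, start)).1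
      = res ++ pvGreedy m (l.drop start.toNat) := by
  intro m
  induction m with
  | zero =>
    intro start res _ _
    rw [show digits - ((0 : Nat) : Int) = digits by push_cast; ring]
    rw [PySem.List.pyRange_one_eq_nil le_rfl]
    simp [pvGreedy]
  | succ m ih =>
    intro start res h0 hle
    rw [PySem.List.pyRange_one_cons (by push_cast; omega : digits - ((m + 1 : Nat) : Int) < digits)]
    rw [List.foldl_cons]
    have harith : digits - (digits - ((m + 1 : Nat) : Int)) = (m : Int) + 1 := by push_cast; ring
    -- window: the slice is the take-window of the current suffix
    have hsl : PySem.List.slice l (some start) (some ((l.length : Int) - (digits - (digits - ((m + 1 : Nat) : Int))) + 1)) =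
        (l.drop start.toNat).take ((l.drop start.toNat).length - m) := by
      rw [harith]
      rw [PySem.List.slice_toNat l h0 (by omega)]
      congr 1
      simp only [List.length_drop]
      omega
    obtain ⟨c, hmax⟩ : ∃ c, PySem.List.max? ((l.drop start.toNat).take ((l.drop start.toNat).length - m)) (fun c => c) = some c := by
      cases hc : PySem.List.max? ((l.drop start.toNat).take ((l.drop start.toNat).length - m)) (fun c => c) with
      | none =>
        have h' := (PySem.List.max?_eq_none_iff _ _).mp hc
        have : ((l.drop start.toNat).take ((l.drop start.toNat).length - m)).length = 0 := by rw [h']; rfl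
        simp only [List.length_take, List.length_drop] at this
        omega
      | some c => exact ⟨c, rfl⟩
    have hcw : c ∈ (l.drop start.toNat).take ((l.drop start.toNat).length - m) := PySem.List.max?_mem hmax
    obtain ⟨i, hidx⟩ : ∃ i, PySem.List.index? ((l.drop start.toNat).take ((l.drop start.toNat).length - m)) c = some i := by
      cases hI : PySem.List.index? ((l.drop start.toNat).take ((l.drop start.toNat).length - m)) c with
      | none => exact absurd ((PySem.List.index?_eq_none_iff _ _).mp hI) (by simpa using hcw)
      | some i => exact ⟨i, rfl⟩
    have hilen : i < l.length - start.toNat - m := by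
      obtain ⟨pre, suf, hwd, hpl, -⟩ := (PySem.List.index?_eq_some_iff _ _ _).mp hidx
      have := congrArg List.length hwd
      simp only [List.length_take, List.length_drop, List.length_append, List.length_cons, hpl] at this
      omega
    have hstep' : pvAStep l digits (res, start) (digits - ((m + 1 : Nat) : Int)) = (res ++ [c], start + (i : Int) + 1) := by
      simp only [pvAStep, hsl, hmax, hidx, Option.getD_some]
    rw [hstep']
    rw [show digits - ((m + 1 : Nat) : Int) + 1 = digits - ((m : Nat) : Int) by push_cast; ring]
    rw [ih (start + (i : Int) + 1) (res ++ [c]) (by omega) (by omega)]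
    have hdrop2 : l.drop (start + (i : Int) + 1).toNat = (l.drop start.toNat).drop (i + 1) := by
      rw [List.drop_drop]
      congr 1
      omega
    rw [hdrop2]
    simp only [pvGreedy, hmax, hidx, Option.getD_some, List.append_assoc, List.singleton_append]

-- ===== VERDICT (by name: the statement is the Claim_ definition above) =====
theorem get_max_joltage_spec : Claim_equal_get_max_joltage := by
  intro bank digits _ hpre
  show get_max_joltage bank digits = get_max_joltage_alt bank digits
  have hlen : digits ≤ (bank.toList.length : Int) := by
    simpa [PySem.Str.len_eq] using hpre
  by_cases hd : digits ≤ 0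
  · simp [get_max_joltage, get_max_joltage_alt, hd, PySem.List.pyRange_one_eq_nil hd]
  · replace hd := not_le.mp hd
    have hA := pvA_loop_eq bank.toList digits digits.toNat 0 [] le_rfl (by omega)
    rw [show digits - ((digits.toNat : Nat) : Int) = 0 by omega] at hA
    simp only [Int.toNat_zero, List.drop_zero, List.nil_append] at hA
    have hB := pvStack_eq_greedy digits.toNat bank.toList (by omega)
    rw [show ((bank.toList.length : Int) - (digits.toNat : Int)) = (bank.toList.length : Int) - digits by omega] at hB
    simp only [get_max_joltage, get_max_joltage_alt]
    rw [if_neg (not_le.mpr hd)]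
    rw [PySem.List.slice_to _ (by omega : (0 : Int) ≤ digits)]
    rw [hA, ← hB]
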